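-- pv_equiv track=rewrite | github.com/rdf4095/image_display_RF | image_canvas_static.py | order_by_size_ORIG
-- ===== SOURCE A (Python) =====
-- def order_by_size_ORIG(dims: list, paths: list) -> list:
--     """Find the 2 images of greatest dimension.
--
--     argument dims specifies the dimension, as image widths or heights.
--     This function should only be called if len(dims) > 2. For 1 or 2
--     images, the function does not manage display arrangement.
--     """
--     num_items = len(dims)
--     sort_w = sorted(dims)
--     largest_2 = sort_w[num_items - 2:]
--     # newpaths = []
--
--     w1 = dims.index(largest_2[0])
--
--     # Mask the location of the first "large" image, to find the second.
--     dims_mod = dims.copy()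
--     dims_mod[w1] = -1
--     w2 = dims_mod.index(largest_2[1])
--
--     indices_all = [*range(len(dims))]
--
--     indices_largest = [w1, w2]
--
--     indices_smallest = [n for n in indices_all if n not in indices_largest]
--
--     newpaths = [paths[w1], paths[w2]]
--     if num_items >= 3:
--         newpaths.insert(1, paths[indices_smallest[0]])
--         if num_items >= 4:
--             newpaths.insert(2, paths[indices_smallest[1]])
--
--     return newpaths
-- ===== SOURCE B (Python) =====
-- def order_by_size_ORIG(dims: list, paths: list) -> list:
--     """Find the 2 images of greatest dimension (no sorting: two linear max scans)."""
--     m1 = max(dims)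
--     i1 = dims.index(m1)
--     rest = dims[:i1] + dims[i1 + 1:]
--     m2 = max(rest)
--     j = rest.index(m2)
--     i2 = j + 1 if j >= i1 else j
--     w1, w2 = (i1, i2) if m2 == m1 else (i2, i1)
--     # the two smallest indices other than w1 and w2 always lie in {0, 1, 2, 3}
--     small = [i for i in (0, 1, 2, 3) if i != w1 and i != w2][:min(2, len(dims) - 2)]
--     return [paths[w1]] + [paths[i] for i in small] + [paths[w2]]
-- ===== Notes on version B (the rewrite author's own statement) =====
-- stated objective: alternative
-- what changed: Replaces sorting the whole dims list and re-finding values with .index plus a -1 sentinel mask by two linear max/index scans (find the max, drop it, find the max of the rest) with A's exact tie-breaking, and computes the two smallest remaining indices arithmetically from {0,1,2,3} instead of filtering the whole index range; the -1 sentinel bug disappears.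
-- intended difference: When max(dims) == -1 and the first index of the second-largest value is not after the first index of -1 (and the path strings make it visible), A's -1 sentinel mask makes dims_mod.index find the masked slot, so A returns a list repeating paths[w1] at both ends with a shifted middle slot (e.g. ['a','b','a']); B returns the path of the true second image at the end (['a','b','c']), which is the intended reordering. — e.g. on order_by_size_ORIG([-3, -5, -1], ["a", "b", "c"]): A returns ["a", "b", "a"], B returns ["a", "b", "c"]
import Mathlib
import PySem

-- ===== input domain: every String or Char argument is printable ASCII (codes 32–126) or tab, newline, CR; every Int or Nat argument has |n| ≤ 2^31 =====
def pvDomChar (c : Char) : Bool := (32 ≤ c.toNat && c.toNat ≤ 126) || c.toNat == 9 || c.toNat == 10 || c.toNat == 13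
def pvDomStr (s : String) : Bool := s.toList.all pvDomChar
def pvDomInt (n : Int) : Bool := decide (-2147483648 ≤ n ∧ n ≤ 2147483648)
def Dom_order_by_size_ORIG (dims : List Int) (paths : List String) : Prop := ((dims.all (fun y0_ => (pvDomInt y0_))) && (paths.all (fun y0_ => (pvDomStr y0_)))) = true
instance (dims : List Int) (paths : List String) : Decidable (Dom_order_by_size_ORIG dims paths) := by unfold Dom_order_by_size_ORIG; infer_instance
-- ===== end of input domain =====

-- B replaces A's full sort + sentinel-masked .index scans by two linear max/index passes;
-- on the sentinel corner described at D_ below, B returns the intended reordering where A repeats one path.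

-- ===== PORT A =====
-- Inside Pre_ every index/lookup below is in range and every .index target is present,
-- so the .getD defaults are never used there.
def order_by_size_ORIG (dims : List Int) (paths : List String) : List String :=
  let num_items : Int := (dims.length : Int)
  let sort_w := PySem.List.sorted dims (fun x => x) false
  let largest_2 := PySem.List.slice sort_w (some (num_items - 2)) none
  let w1 : Nat := (PySem.List.index? dims (PySem.List.pyGetD largest_2 0 0)).getD 0
  let dims_mod := PySem.List.pySetD dims (w1 : Int) (-1)
  let w2 : Nat := (PySem.List.index? dims_mod (PySem.List.pyGetD largest_2 1 0)).getD 0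
  let indices_all := PySem.List.pyRange 0 (dims.length : Int) 1
  let indices_largest : List Int := [(w1 : Int), (w2 : Int)]
  let indices_smallest := indices_all.filter (fun n => !(indices_largest.contains n))
  let newpaths := [PySem.List.pyGetD paths (w1 : Int) "", PySem.List.pyGetD paths (w2 : Int) ""]
  if 3 ≤ num_items then
    let newpaths := PySem.List.insert newpaths 1
      (PySem.List.pyGetD paths (PySem.List.pyGetD indices_smallest 0 0) "")
    if 4 ≤ num_items then
      PySem.List.insert newpaths 2
        (PySem.List.pyGetD paths (PySem.List.pyGetD indices_smallest 1 0) "")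
    else newpaths
  else newpaths

-- ===== PORT B =====
def order_by_size_ORIG_alt (dims : List Int) (paths : List String) : List String :=
  let m1 := (PySem.List.max? dims (fun x => x)).getD 0
  let i1 : Nat := (PySem.List.index? dims m1).getD 0
  let rest := PySem.List.slice dims none (some (i1 : Int)) ++ PySem.List.slice dims (some ((i1 : Int) + 1)) none
  let m2 := (PySem.List.max? rest (fun x => x)).getD 0
  let j : Nat := (PySem.List.index? rest m2).getD 0
  let i2 : Nat := if j ≥ i1 then j + 1 else j
  let w : Nat × Nat := if m2 == m1 then (i1, i2) else (i2, i1)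
  -- the two smallest indices other than w1 and w2 always lie in {0, 1, 2, 3}
  let small := PySem.List.slice
    (([0, 1, 2, 3] : List Int).filter
      (fun i => !(i == (w.1 : Int)) && !(i == (w.2 : Int)))) none
    (some (min 2 ((dims.length : Int) - 2)))
  [PySem.List.pyGetD paths (w.1 : Int) ""]
    ++ small.map (fun i => PySem.List.pyGetD paths i "")
    ++ [PySem.List.pyGetD paths (w.2 : Int) ""]

-- ===== PRECONDITION & SPEC =====
-- helper for Pre_ and D_: max of a list of ints (0 for [])
def pvMaxD (l : List Int) : Int := l.foldl max (l.headD 0)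

-- Pre_ excludes inputs with fewer than 2 dims (A raises IndexError on largest_2) and inputs where
-- paths is shorter than dims (A's paths[...] lookups raise IndexError for most index choices;
-- the few index choices on which A still returns are cited in claim.json).
def Pre_order_by_size_ORIG (dims : List Int) (paths : List String) : Prop :=
  2 ≤ dims.length ∧ dims.length ≤ paths.length
instance (dims : List Int) (paths : List String) : Decidable (Pre_order_by_size_ORIG dims paths) := by
  unfold Pre_order_by_size_ORIG; infer_instance
def pvWitness_order_by_size_ORIG : List Int × List String := ([3, 1, 2], ["a", "b", "c"])

-- When max(dims) == -1 and the first index of the second-largest value is not after the first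
-- index of -1, A's -1 sentinel mask makes dims_mod.index find the masked slot itself, so A returns
-- a list with paths[w1] repeated at both ends and one shifted middle slot, while B returns the true
-- second image's path at the end; D_ holds exactly when the path strings make that difference
-- visible (A ≠ B everywhere inside D_, proved below), and B's value is the intended reordering.
-- q = the index A uses at both ends; r = the index of the true second image, which B uses at the end
def D_order_by_size_ORIG (dims : List Int) (paths : List String) : Prop :=
  let pg := fun k => paths.getD k ""
  let q := List.idxOf (pvMaxD (dims.erase (-1))) dims
  let i := List.idxOf (-1) dims
  let r := if q = i then q + 1 + List.idxOf (-1) (dims.drop (q + 1)) else i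
  pvMaxD dims = -1 ∧ q ≤ i ∧
    ¬(pg q = pg r ∧ (r = 1 ∧ 3 ≤ dims.length → pg 1 = pg 2) ∧
      (r ≤ 2 ∧ 4 ≤ dims.length → pg 2 = pg 3))
instance (dims : List Int) (paths : List String) : Decidable (D_order_by_size_ORIG dims paths) := by
  unfold D_order_by_size_ORIG; infer_instance

def Spec_order_by_size_ORIG (dims : List Int) (paths : List String) (out : List String) : Prop :=
  ¬ D_order_by_size_ORIG dims paths → out = order_by_size_ORIG_alt dims paths
instance (dims : List Int) (paths : List String) (out : List String) : Decidable (Spec_order_by_size_ORIG dims paths out) := by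
  unfold Spec_order_by_size_ORIG; infer_instance

def pvDiffWitness_order_by_size_ORIG : List Int × List String := ([-3, -5, -1], ["a", "b", "c"])
def pvDiffWitnessOut_order_by_size_ORIG : (List String) × (List String) :=
  (["a", "b", "a"], ["a", "b", "c"])

-- ===== CLAIM (what is proved, stated in full; the proofs are below) =====
def Claim_unchanged_order_by_size_ORIG : Prop := ∀ (dims : List Int) (paths : List String), Dom_order_by_size_ORIG dims paths → Pre_order_by_size_ORIG dims paths → Spec_order_by_size_ORIG dims paths (order_by_size_ORIG dims paths)
def Claim_exact_order_by_size_ORIG : Prop := ∀ (dims : List Int) (paths : List String), Dom_order_by_size_ORIG dims paths → Pre_order_by_size_ORIG dims paths → D_order_by_size_ORIG dims paths → order_by_size_ORIG dims paths ≠ order_by_size_ORIG_alt dims paths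
def Claim_changed_order_by_size_ORIG : Prop := Dom_order_by_size_ORIG (pvDiffWitness_order_by_size_ORIG.1) (pvDiffWitness_order_by_size_ORIG.2) ∧ Pre_order_by_size_ORIG (pvDiffWitness_order_by_size_ORIG.1) (pvDiffWitness_order_by_size_ORIG.2) ∧ D_order_by_size_ORIG (pvDiffWitness_order_by_size_ORIG.1) (pvDiffWitness_order_by_size_ORIG.2) ∧ order_by_size_ORIG (pvDiffWitness_order_by_size_ORIG.1) (pvDiffWitness_order_by_size_ORIG.2) = pvDiffWitnessOut_order_by_size_ORIG.1 ∧ order_by_size_ORIG_alt (pvDiffWitness_order_by_size_ORIG.1) (pvDiffWitness_order_by_size_ORIG.2) = pvDiffWitnessOut_order_by_size_ORIG.2 ∧ pvDiffWitnessOut_order_by_size_ORIG.1 ≠ pvDiffWitnessOut_order_by_size_ORIG.2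

-- ===== LEMMAS AND PROOFS =====

-- Proof-only helpers and lemmas (nothing above the claim block depends on these).

-- the sentinel corner, as used by the proofs
def pvCorner3 (dims : List Int) : Prop :=
  2 ≤ dims.length ∧ pvMaxD dims = -1 ∧
    List.idxOf (pvMaxD (dims.erase (-1))) dims ≤ List.idxOf (-1 : Int) dims

-- target list of both assemblies: first the second-largest's path, then up to two
-- "smallest" paths, then the largest's path
def pvBuild (dims : List Int) (paths : List String) (w1 w2 : Nat) : List String :=
  [paths.getD w1 ""] ++
    (((List.range dims.length).filter (fun i => !(i == w1) && !(i == w2))).take 2).map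
      (fun i => paths.getD i "") ++ [paths.getD w2 ""]

-- uniqueness of the least index (≠ p) carrying value v
theorem pvLeastNe_unique (l : List Int) (p : Nat) (v : Int) {a b : Nat}
    (ha2 : a ≠ p) (ha3 : l.getD a 0 = v) (ha4 : ∀ j, j < a → j ≠ p → l.getD j 0 ≠ v)
    (hb2 : b ≠ p) (hb3 : l.getD b 0 = v) (hb4 : ∀ j, j < b → j ≠ p → l.getD j 0 ≠ v) :
    a = b := by
  rcases Nat.lt_trichotomy a b with h | h | h
  · exact absurd ha3 (hb4 a h ha2)
  · exact h
  · exact absurd hb3 (ha4 b h hb2)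

theorem pvFilterLen (w1 w2 : Nat) (hne : w1 ≠ w2) (n : Nat) :
    ((List.range n).filter (fun i => !(i == w1) && !(i == w2))).length
      = n - ((if w1 < n then 1 else 0) + (if w2 < n then 1 else 0)) := by
  induction n with
  | zero => simp
  | succ n ih =>
    rw [List.range_succ, List.filter_append, List.length_append, ih, List.filter_singleton,
      Bool.cond_eq_ite]
    split_ifs <;>
      simp only [List.length_cons, List.length_nil, Bool.and_eq_true, Bool.not_eq_true',
        beq_eq_false_iff_ne, ne_eq, not_and, not_not] at * <;>
      omega


theorem pvIdxOf?_eq_some (l : List Int) (v : Int) (h : v ∈ l) :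
    List.idxOf? v l = some (l.idxOf v) := by
  rw [List.idxOf?_eq_some_iff]
  refine ⟨List.idxOf_lt_length_of_mem h, List.getElem_idxOf _, ?_⟩
  intro j hj hv
  have hjlen : j < l.length := lt_trans hj (List.idxOf_lt_length_of_mem h)
  have hmem : v ∈ l.take (j + 1) := by
    have h1 : (l.take (j + 1))[j]'(by simp; omega) = l[j] := List.getElem_take
    rw [hv] at h1
    exact h1 ▸ List.getElem_mem _
  have := (List.mem_take_iff_idxOf_lt h).1 hmem
  omega

theorem pvIndexD (l : List Int) (v : Int) (h : v ∈ l) :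
    (PySem.List.index? l v).getD 0 = l.idxOf v := by
  rw [PySem.List.index?_eq_idxOf?, pvIdxOf?_eq_some l v h]
  rfl

theorem pvIdxOf_min (l : List Int) (v : Int) (h : v ∈ l) :
    ∀ j, j < l.idxOf v → l.getD j 0 ≠ v := by
  intro j hj
  have hjlen : j < l.length := lt_trans hj (List.idxOf_lt_length_of_mem h)
  rw [List.getD_eq_getElem _ _ hjlen]
  have h2 := pvIdxOf?_eq_some l v h
  rw [List.idxOf?_eq_some_iff] at h2
  exact h2.2.2 j hj

theorem pvRest_char (dims : List Int) (i1 : Nat) (v : Int)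
    (hi1 : i1 < dims.length)
    (hv : v ∈ dims.take i1 ++ dims.drop (i1 + 1)) (j i2 : Nat)
    (hj : j = (dims.take i1 ++ dims.drop (i1 + 1)).idxOf v)
    (hi2 : i2 = if i1 ≤ j then j + 1 else j) :
    i2 < dims.length ∧ i2 ≠ i1 ∧ dims.getD i2 0 = v ∧
      ∀ k, k < i2 → k ≠ i1 → dims.getD k 0 ≠ v := by
  have htl : (dims.take i1).length = i1 := by simp; omega
  have hrlen : (dims.take i1 ++ dims.drop (i1 + 1)).length = dims.length - 1 := by
    rw [← List.eraseIdx_eq_take_drop_succ, List.length_eraseIdx, if_pos hi1]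
  have hrget : ∀ k : Nat, (dims.take i1 ++ dims.drop (i1 + 1))[k]? =
      if k < i1 then dims[k]? else dims[k + 1]? := by
    intro k
    by_cases hk : k < i1
    · rw [List.getElem?_append_left (by omega : k < (dims.take i1).length),
        List.getElem?_take, if_pos hk, if_pos hk]
    · rw [List.getElem?_append_right (by omega : (dims.take i1).length ≤ k),
        List.getElem?_drop, if_neg hk, htl]
      congr 1
      omega
  have hjlt : j < (dims.take i1 ++ dims.drop (i1 + 1)).length := hj ▸ List.idxOf_lt_length_of_mem hv
  have hjv : (dims.take i1 ++ dims.drop (i1 + 1))[j]? = some v := hj ▸ List.getElem?_idxOf hv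
  have hjmin : ∀ k, k < j → (dims.take i1 ++ dims.drop (i1 + 1)).getD k 0 ≠ v := by
    intro k hk
    subst hj
    exact pvIdxOf_min _ v hv k hk
  by_cases hcase : i1 ≤ j
  · rw [hi2, if_pos hcase]
    have hgv : dims.getD (j + 1) 0 = v := by
      rw [List.getD_eq_getElem?_getD]
      rw [hrget j, if_neg (by omega)] at hjv
      rw [hjv]
      rfl
    refine ⟨by omega, by omega, hgv, ?_⟩
    intro k hk hkne
    by_cases hki : k < i1
    · have h1 := hjmin k (by omega)
      rwa [List.getD_eq_getElem?_getD, hrget k, if_pos hki, ← List.getD_eq_getElem?_getD] at h1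
    · have h1 := hjmin (k - 1) (by omega)
      rw [List.getD_eq_getElem?_getD, hrget (k - 1), if_neg (by omega)] at h1
      have hkk : k - 1 + 1 = k := by omega
      rwa [hkk, ← List.getD_eq_getElem?_getD] at h1
  · rw [hi2, if_neg hcase]
    have hgv : dims.getD j 0 = v := by
      rw [List.getD_eq_getElem?_getD]
      rw [hrget j, if_pos (by omega)] at hjv
      rw [hjv]
      rfl
    refine ⟨by omega, by omega, hgv, ?_⟩
    intro k hk hkne
    have h1 := hjmin k (by omega)
    rwa [List.getD_eq_getElem?_getD, hrget k, if_pos (by omega), ← List.getD_eq_getElem?_getD] at h1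

theorem pvMaxD_cons (x : Int) (t : List Int) : pvMaxD (x :: t) = t.foldl max x := by
  simp [pvMaxD]

theorem pvMaxD_mem (l : List Int) (h : l ≠ []) : pvMaxD l ∈ l := by
  match l with
  | x :: t =>
    rw [pvMaxD_cons]
    rcases PySem.List.foldl_max_mem t x with h | h
    · rw [h]; exact List.mem_cons_self
    · exact List.mem_cons_of_mem _ h

theorem pvMaxD_le (l : List Int) (h : l ≠ []) : ∀ y ∈ l, y ≤ pvMaxD l := by
  match l with
  | x :: t =>
    intro y hy
    rw [pvMaxD_cons]
    rcases List.mem_cons.1 hy with rfl | hy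
    · exact (PySem.List.le_foldl_max t y).1
    · exact (PySem.List.le_foldl_max t x).2 y hy

theorem pvMaxD_eq_max? (l : List Int) (h : l ≠ []) :
    (PySem.List.max? l (fun y => y)).getD 0 = pvMaxD l := by
  match l with
  | x :: t =>
    rw [PySem.List.max?_id_cons, pvMaxD_cons]
    rfl

theorem pvSorted_last (dims : List Int) (h : dims ≠ []) :
    (PySem.List.sorted dims (fun x => x) false).getD (dims.length - 1) 0 = pvMaxD dims := by
  have hperm : (PySem.List.sorted dims (fun x => x) false).Perm dims :=
    PySem.List.sorted_perm dims (fun x => x) false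
  have hlen : (PySem.List.sorted dims (fun x => x) false).length = dims.length := hperm.length_eq
  have hne : 1 ≤ dims.length := by
    cases dims with
    | nil => exact absurd rfl h
    | cons a l => simp
  have hlt : dims.length - 1 < (PySem.List.sorted dims (fun x => x) false).length := by omega
  rw [List.getD_eq_getElem _ _ hlt]
  apply le_antisymm
  · exact pvMaxD_le dims h _ (hperm.mem_iff.1 (List.getElem_mem _))
  · have hmem : pvMaxD dims ∈ (PySem.List.sorted dims (fun x => x) false) :=
      hperm.mem_iff.2 (pvMaxD_mem dims h)
    obtain ⟨k, hk, hkv⟩ := List.getElem_of_mem hmem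
    rw [← hkv]
    exact PySem.List.sorted_id_getElem_mono dims (by omega : k ≤ dims.length - 1) hlt

theorem pvSplit_getElem? (l : List Int) (p : Nat) (hp : p < l.length) (k : Nat) :
    (l.take p ++ l.drop (p + 1))[k]? = if k < p then l[k]? else l[k + 1]? := by
  have htl : (l.take p).length = p := by simp; omega
  by_cases hk : k < p
  · rw [List.getElem?_append_left (by omega : k < (l.take p).length),
      List.getElem?_take, if_pos hk, if_pos hk]
  · rw [List.getElem?_append_right (by omega : (l.take p).length ≤ k),
      List.getElem?_drop, if_neg hk, htl]
    congr 1
    omega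

theorem pvGetD_mem (l : List Int) (k : Nat) (h : k < l.length) : l.getD k 0 ∈ l := by
  rw [List.getD_eq_getElem _ _ h]
  exact List.getElem_mem _

theorem pvSorted_second (dims : List Int) (hn : 2 ≤ dims.length) :
    (PySem.List.sorted dims (fun x => x) false).getD (dims.length - 2) 0 ∈ dims.erase (pvMaxD dims)
    ∧ ∀ y ∈ dims.erase (pvMaxD dims),
        y ≤ (PySem.List.sorted dims (fun x => x) false).getD (dims.length - 2) 0 := by
  have hne : dims ≠ [] := by intro h; rw [h] at hn; simp at hn
  have hperm : (PySem.List.sorted dims (fun x => x) false).Perm dims :=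
    PySem.List.sorted_perm dims (fun x => x) false
  set t := PySem.List.sorted dims (fun x => x) false with ht
  have hlen : t.length = dims.length := hperm.length_eq
  have hmlast : t.getD (dims.length - 1) 0 = pvMaxD dims := pvSorted_last dims hne
  set m := pvMaxD dims with hm
  have hmem_t : m ∈ t := by
    rw [← hmlast]
    exact pvGetD_mem t _ (by omega)
  have hp : t.idxOf m < t.length := List.idxOf_lt_length_of_mem hmem_t
  set p := t.idxOf m with hpdef
  have hpv : t.getD p 0 = m := by
    rw [List.getD_eq_getElem _ _ hp]
    exact List.getElem_idxOf _
  have herase : t.erase m = t.take p ++ t.drop (p + 1) := by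
    rw [List.erase_eq_eraseIdx, pvIdxOf?_eq_some t m hmem_t]
    exact List.eraseIdx_eq_take_drop_succ t p
  have heraseperm : (t.erase m).Perm (dims.erase m) := hperm.erase m
  have hs2 : (dims.length - 2) < t.length := by omega
  have hmono : ∀ a b : Nat, a ≤ b → b < t.length → t.getD a 0 ≤ t.getD b 0 := by
    intro a b hab hb
    rw [List.getD_eq_getElem _ _ (by omega), List.getD_eq_getElem _ _ hb]
    exact PySem.List.sorted_id_getElem_mono dims hab hb
  have hsplitlen : (t.take p ++ t.drop (p + 1)).length = t.length - 1 := by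
    rw [← List.eraseIdx_eq_take_drop_succ, List.length_eraseIdx, if_pos hp]
  have hgetsome : ∀ k : Nat, k < t.length → t[k]? = some (t.getD k 0) := by
    intro k hk
    rw [List.getD_eq_getElem _ _ hk, List.getElem?_eq_getElem hk]
  constructor
  · -- s ∈ dims.erase m
    apply heraseperm.mem_iff.1
    rw [herase]
    by_cases hc : p = dims.length - 1
    · apply List.mem_of_getElem? (i := dims.length - 2)
      rw [pvSplit_getElem? t p hp, if_pos (by omega), hgetsome _ hs2]
    · by_cases hc2 : p = dims.length - 2
      · -- s = t[p] = m; last entry is also m and survives in the drop part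
        have hlastm : t.getD (dims.length - 1) 0 = m := hmlast
        have hsm : t.getD (dims.length - 2) 0 = m := by rw [← hc2]; exact hpv
        apply List.mem_of_getElem? (i := dims.length - 2)
        rw [pvSplit_getElem? t p hp, if_neg (by omega)]
        have hidx : dims.length - 2 + 1 = dims.length - 1 := by omega
        rw [hidx, hgetsome _ (by omega), hlastm, hsm]
      · -- p < dims.length - 2
        apply List.mem_of_getElem? (i := dims.length - 3)
        rw [pvSplit_getElem? t p hp, if_neg (by omega)]
        have hidx : dims.length - 3 + 1 = dims.length - 2 := by omega
        rw [hidx, hgetsome _ hs2]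
  · intro y hy
    have hy2 : y ∈ t.take p ++ t.drop (p + 1) := by
      rw [← herase]
      exact heraseperm.mem_iff.2 hy
    obtain ⟨k, hk, hkv⟩ := List.getElem_of_mem hy2
    have hkv? : (t.take p ++ t.drop (p + 1))[k]? = some y := by
      rw [List.getElem?_eq_getElem hk, hkv]
    rw [pvSplit_getElem? t p hp] at hkv?
    by_cases hck : k < p
    · rw [if_pos hck, hgetsome k (by omega)] at hkv?
      have : t.getD k 0 = y := by injection hkv?
      rw [← this]
      exact hmono k (dims.length - 2) (by omega) hs2
    · rw [if_neg hck] at hkv?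
      have hk1 : k + 1 < t.length := by
        rw [hsplitlen] at hk
        omega
      rw [hgetsome (k+1) hk1] at hkv?
      have hyv : t.getD (k+1) 0 = y := by injection hkv?
      have hple : p ≤ dims.length - 2 := by
        rw [hsplitlen] at hk
        omega
      have hym : y ≤ m := pvMaxD_le dims hne y (List.mem_of_mem_erase hy)
      calc y ≤ m := hym
        _ = t.getD p 0 := hpv.symm
        _ ≤ t.getD (dims.length - 2) 0 := hmono p (dims.length - 2) hple hs2

theorem pvIdxOf_getD (l : List Int) (v : Int) (h : v ∈ l) : l.getD (l.idxOf v) 0 = v := by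
  rw [List.getD_eq_getElem _ _ (List.idxOf_lt_length_of_mem h)]
  exact List.getElem_idxOf _

-- proof-side names for A's repeated end index and B's true second index
def pvCornerQ (dims : List Int) : Nat := List.idxOf (pvMaxD (dims.erase (-1))) dims
def pvCornerR (dims : List Int) : Nat :=
  if pvMaxD (dims.erase (-1)) = -1 then
    pvCornerQ dims + 1 + List.idxOf (-1 : Int) (dims.drop (pvCornerQ dims + 1))
  else List.idxOf (-1 : Int) dims

theorem pvCornerQ_eq (dims : List Int) :
    pvCornerQ dims = List.idxOf (pvMaxD (dims.erase (-1))) dims := rfl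

-- D_'s inline "q = i" test agrees with pvCornerR's "second largest = -1" test
theorem pvR_eq (dims : List Int) (hmax : pvMaxD dims = -1) :
    (if List.idxOf (pvMaxD (dims.erase (-1))) dims = List.idxOf (-1 : Int) dims then
       List.idxOf (pvMaxD (dims.erase (-1))) dims + 1 +
         List.idxOf (-1 : Int) (dims.drop (List.idxOf (pvMaxD (dims.erase (-1))) dims + 1))
     else List.idxOf (-1 : Int) dims) = pvCornerR dims := by
  unfold pvCornerR pvCornerQ
  by_cases hs : pvMaxD (dims.erase (-1)) = -1
  · rw [hs]
    simp
  · rw [if_neg hs, if_neg ?_]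
    have hne : dims ≠ [] := by
      intro he
      rw [he] at hmax
      simp [pvMaxD] at hmax
    have hm1mem : (-1 : Int) ∈ dims := hmax ▸ pvMaxD_mem dims hne
    by_cases hsmem : pvMaxD (dims.erase (-1)) ∈ dims
    · intro h
      have h1 := pvIdxOf_getD dims _ hsmem
      rw [h, pvIdxOf_getD dims (-1) hm1mem] at h1
      exact hs h1.symm
    · intro h
      have hq : List.idxOf (pvMaxD (dims.erase (-1))) dims = dims.length :=
        List.idxOf_of_notMem hsmem
      have hi : List.idxOf (-1 : Int) dims < dims.length :=
        List.idxOf_lt_length_of_mem hm1mem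
      omega

theorem pvD_iff (dims : List Int) (paths : List String) (hmax : pvMaxD dims = -1) :
    D_order_by_size_ORIG dims paths ↔
      (pvCornerQ dims ≤ List.idxOf (-1 : Int) dims ∧
        ¬(paths.getD (pvCornerQ dims) "" = paths.getD (pvCornerR dims) "" ∧
          (pvCornerR dims = 1 ∧ 3 ≤ dims.length → paths.getD 1 "" = paths.getD 2 "") ∧
          (pvCornerR dims ≤ 2 ∧ 4 ≤ dims.length → paths.getD 2 "" = paths.getD 3 ""))) := by
  have h := pvR_eq dims hmax
  unfold D_order_by_size_ORIG
  simp only [h, hmax, pvCornerQ_eq, true_and]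


theorem pvSetGetD (l : List Int) (p : Nat) (c : Int) (hp : p < l.length) (k : Nat)
    (hk : k < l.length) :
    (l.set p c).getD k 0 = if k = p then c else l.getD k 0 := by
  rw [List.getD_eq_getElem?_getD, List.getElem?_set]
  by_cases h : k = p
  · rw [if_pos h, if_pos h.symm, if_pos hp]
    rfl
  · rw [if_neg h, if_neg (fun hh => h hh.symm), ← List.getD_eq_getElem?_getD]

-- (set ln).idxOf v computed from a least-characterization on the set list
theorem pvSetIdxOf (l : List Int) (p : Nat) (c : Int) (hp : p < l.length) (v : Int) (b : Nat)
    (hmem : v ∈ l.set p c)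
    (hb1 : b < l.length) (hb3 : (l.set p c).getD b 0 = v)
    (hb4 : ∀ k, k < b → (l.set p c).getD k 0 ≠ v) :
    (l.set p c).idxOf v = b := by
  apply pvLeastNe_unique (l.set p c) l.length v
  · exact Nat.ne_of_lt (List.length_set (as := l) ▸ List.idxOf_lt_length_of_mem hmem)
  · exact pvIdxOf_getD _ v hmem
  · intro k hk _
    exact pvIdxOf_min _ v hmem k hk
  · exact Nat.ne_of_lt hb1
  · exact hb3
  · intro k hk _
    exact hb4 k hk

theorem pvBeqCast (a b : Nat) : (((a : Int)) == ((b : Int))) = (a == b) := by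
  by_cases h : a = b <;> simp [h]

-- the first two valid indices are always found among 0,1,2,3
theorem pvSmallNat (n w1 w2 : Nat) (hn2 : 2 ≤ n) (h1 : w1 < n) (h2 : w2 < n) (hne : w1 ≠ w2) :
    (List.filter (fun i => !(i == w1) && !(i == w2)) [0, 1, 2, 3]).take (min 2 (n - 2))
      = ((List.range n).filter (fun i => !(i == w1) && !(i == w2))).take 2 := by
  have h4 : ([0, 1, 2, 3] : List Nat) = List.range 4 := rfl
  rcases Nat.lt_or_ge n 4 with hn4 | hn4
  · interval_cases n
    · -- n = 2
      have hz : ((List.range 2).filter (fun i => !(i == w1) && !(i == w2))).length = 0 := by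
        rw [pvFilterLen w1 w2 hne, if_pos h1, if_pos h2]
      rw [List.eq_nil_of_length_eq_zero hz]
      simp
    · -- n = 3
      have hz : ((List.range 3).filter (fun i => !(i == w1) && !(i == w2))).length = 1 := by
        rw [pvFilterLen w1 w2 hne, if_pos h1, if_pos h2]
      obtain ⟨x, hx⟩ := List.length_eq_one_iff.1 hz
      rw [h4, show (4 : Nat) = 3 + 1 from rfl, List.range_succ, List.filter_append, hx]
      simp
  · have hmin : min 2 (n - 2) = 2 := by omega
    have hlen : 2 ≤ ((List.range 4).filter (fun i => !(i == w1) && !(i == w2))).length := by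
      rw [pvFilterLen w1 w2 hne]
      split_ifs <;> omega
    have hsplit : List.range n = List.range 4 ++ (List.range (n - 4)).map (4 + ·) := by
      rw [← List.range_add]
      congr 1
      omega
    rw [h4, hmin, hsplit, List.filter_append, List.take_append]
    rw [show 2 - ((List.range 4).filter (fun i => !(i == w1) && !(i == w2))).length = 0 by omega]
    simp

theorem pvB_assemble (dims : List Int) (paths : List String) (w1 w2 : Nat)
    (hn2 : 2 ≤ dims.length) (h1 : w1 < dims.length) (h2 : w2 < dims.length) (hne : w1 ≠ w2) :
    [PySem.List.pyGetD paths (↑w1) ""] ++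
      List.map (fun i => PySem.List.pyGetD paths i "")
        (PySem.List.slice
          (List.filter (fun i => !(i == (↑w1 : Int)) && !(i == (↑w2 : Int)))
            ([0, 1, 2, 3] : List Int)) none (some (min 2 ((dims.length : Int) - 2))))
      ++ [PySem.List.pyGetD paths (↑w2) ""] = pvBuild dims paths w1 w2 := by
  rw [show (min 2 ((dims.length : Int) - 2)) = ((min 2 (dims.length - 2) : Nat) : Int) by omega,
    PySem.List.slice_to_natCast]
  rw [show (([0, 1, 2, 3] : List Int)) = List.map (fun k : Nat => (k : Int)) [0, 1, 2, 3] from rfl,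
    List.filter_map]
  have hpred : List.filter ((fun i => !(i == (↑w1 : Int)) && !(i == (↑w2 : Int))) ∘ fun k : Nat => (k : Int))
      ([0, 1, 2, 3] : List Nat) = List.filter (fun i => !(i == w1) && !(i == w2)) [0, 1, 2, 3] := by
    refine List.filter_congr ?_
    intro i _
    simp only [Function.comp_apply, pvBeqCast]
  rw [hpred, ← List.map_take, pvSmallNat dims.length w1 w2 hn2 h1 h2 hne, List.map_map]
  simp only [Function.comp_def, PySem.List.pyGetD_natCast]
  rfl

theorem pvA_assemble (dims : List Int) (paths : List String) (w1 w2 : Nat)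
    (hn2 : 2 ≤ dims.length)
    (h1 : w1 < dims.length) (h2 : w2 < dims.length) (hne : w1 ≠ w2) :
    (if 3 ≤ (dims.length : Int) then
      if 4 ≤ (dims.length : Int) then
        PySem.List.insert
          (PySem.List.insert
            [PySem.List.pyGetD paths (↑w1) "", PySem.List.pyGetD paths (↑w2) ""] 1
            (PySem.List.pyGetD paths
              (PySem.List.pyGetD
                (List.filter (fun n => !([(↑w1 : Int), (↑w2 : Int)].contains n))
                  (PySem.List.pyRange 0 (dims.length : Int) 1)) 0 0) "")) 2
          (PySem.List.pyGetD paths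
            (PySem.List.pyGetD
              (List.filter (fun n => !([(↑w1 : Int), (↑w2 : Int)].contains n))
                (PySem.List.pyRange 0 (dims.length : Int) 1)) 1 0) "")
      else
        PySem.List.insert
          [PySem.List.pyGetD paths (↑w1) "", PySem.List.pyGetD paths (↑w2) ""] 1
          (PySem.List.pyGetD paths
            (PySem.List.pyGetD
              (List.filter (fun n => !([(↑w1 : Int), (↑w2 : Int)].contains n))
                (PySem.List.pyRange 0 (dims.length : Int) 1)) 0 0) "")
    else
      [PySem.List.pyGetD paths (↑w1) "", PySem.List.pyGetD paths (↑w2) ""])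
    = pvBuild dims paths w1 w2 := by
  have hFeq : List.filter (fun n => !([(↑w1 : Int), (↑w2 : Int)].contains n))
      (PySem.List.pyRange 0 (dims.length : Int) 1)
      = List.map (fun k : Nat => (k : Int))
          ((List.range dims.length).filter (fun i => !(i == w1) && !(i == w2))) := by
    rw [PySem.List.pyRange_zero_natCast, List.filter_map]
    refine congrArg _ (List.filter_congr ?_)
    intro i _
    by_cases e1 : i = w1 <;> by_cases e2 : i = w2 <;>
      simp [e1, e2]
  rw [hFeq]
  set S := (List.range dims.length).filter (fun i => !(i == w1) && !(i == w2)) with hS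
  have hSlen : S.length = dims.length - 2 := by
    rw [hS, pvFilterLen w1 w2 hne, if_pos h1, if_pos h2]
  by_cases hc3 : 3 ≤ dims.length
  · rw [if_pos (by exact_mod_cast hc3)]
    by_cases hc4 : 4 ≤ dims.length
    · rw [if_pos (by exact_mod_cast hc4)]
      rcases S with _ | ⟨s0, _ | ⟨s1, tl⟩⟩ <;> simp only [List.length_nil, List.length_cons] at hSlen
      · omega
      · omega
      · simp only [pvBuild, ← hS]
        simp only [List.map_cons, PySem.List.pyGetD_zero_cons]
        rw [PySem.List.pyGetD_ofNat' ((s0 : Int) :: (s1 : Int) :: List.map (fun k : Nat => (k : Int)) tl) 1 0]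
        rw [PySem.List.insert_ofNat _ 1 _ (by simp),
          PySem.List.insert_ofNat _ 2 _ (by simp)]
        simp [PySem.List.pyGetD_natCast]
    · rw [if_neg (by exact_mod_cast hc4)]
      have hn3 : dims.length = 3 := by omega
      rcases S with _ | ⟨s0, _ | ⟨s1, tl⟩⟩ <;> simp only [List.length_nil, List.length_cons] at hSlen
      · omega
      · simp only [pvBuild, ← hS]
        simp only [List.map_cons, List.map_nil, PySem.List.pyGetD_zero_cons]
        rw [PySem.List.insert_ofNat _ 1 _ (by simp)]
        simp [PySem.List.pyGetD_natCast]
      · omega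
  · rw [if_neg (by exact_mod_cast hc3)]
    have hn2' : dims.length = 2 := by omega
    have hSnil : S = [] := List.eq_nil_of_length_eq_zero (by omega)
    simp only [pvBuild, ← hS, hSnil]
    simp [PySem.List.pyGetD_natCast]

theorem pvMain (dims : List Int) (paths : List String)
    (hpre : Pre_order_by_size_ORIG dims paths) (hnd : ¬ pvCorner3 dims) :
    order_by_size_ORIG dims paths = order_by_size_ORIG_alt dims paths := by
  obtain ⟨hn2, hnp⟩ := hpre
  have hne : dims ≠ [] := by intro h; rw [h] at hn2; simp at hn2
  -- the max and its first index
  have hmmem : pvMaxD dims ∈ dims := pvMaxD_mem dims hne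
  have hmle : ∀ y ∈ dims, y ≤ pvMaxD dims := pvMaxD_le dims hne
  set m := pvMaxD dims with hm
  set i1 := dims.idxOf m with hi1def
  have hi1lt : i1 < dims.length := List.idxOf_lt_length_of_mem hmmem
  have hi1v : dims.getD i1 0 = m := by
    rw [List.getD_eq_getElem _ _ hi1lt]; exact List.getElem_idxOf _
  have hi1min : ∀ j, j < i1 → dims.getD j 0 ≠ m := pvIdxOf_min dims m hmmem
  -- the rest list
  set rest := dims.take i1 ++ dims.drop (i1 + 1) with hrest
  have hrest_erase : rest = dims.erase m := by
    rw [List.erase_eq_eraseIdx, pvIdxOf?_eq_some dims m hmmem]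
    show rest = dims.eraseIdx (List.idxOf m dims)
    rw [List.eraseIdx_eq_take_drop_succ]
  have hrestlen : rest.length = dims.length - 1 := by
    rw [hrest, ← List.eraseIdx_eq_take_drop_succ, List.length_eraseIdx, if_pos hi1lt]
  have hrestne : rest ≠ [] := by
    intro h
    rw [h] at hrestlen
    simp at hrestlen
    omega
  have hm2mem : pvMaxD rest ∈ rest := pvMaxD_mem rest hrestne
  have hm2le : ∀ y ∈ rest, y ≤ pvMaxD rest := pvMaxD_le rest hrestne
  set m2 := pvMaxD rest with hm2
  -- the sorted list's last two entries
  set t := PySem.List.sorted dims (fun x => x) false with ht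
  have htlen : t.length = dims.length := (PySem.List.sorted_perm dims (fun x => x) false).length_eq
  have hlast : t.getD (dims.length - 1) 0 = m := pvSorted_last dims hne
  obtain ⟨hs_mem, hs_le⟩ := pvSorted_second dims hn2
  set s := t.getD (dims.length - 2) 0 with hs
  have hsm2 : s = m2 := by
    apply le_antisymm
    · exact hm2le s (hrest_erase ▸ hs_mem)
    · exact hs_le m2 (hrest_erase ▸ hm2mem)
  have hm2lem : m2 ≤ m := hmle m2 (List.mem_of_mem_erase (hrest_erase ▸ hm2mem))
  -- second index
  set j := rest.idxOf m2 with hjdef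
  set i2 := if i1 ≤ j then j + 1 else j with hi2def
  obtain ⟨hi2lt, hi2ne, hi2v, hi2min⟩ :=
    pvRest_char dims i1 m2 hi1lt (hrest ▸ hm2mem) j i2 (hrest ▸ hjdef) hi2def
  have hBval : order_by_size_ORIG_alt dims paths
      = pvBuild dims paths (if m2 = m then i1 else i2) (if m2 = m then i2 else i1) := by
    simp only [order_by_size_ORIG_alt]
    rw [pvMaxD_eq_max? dims hne, ← hm]
    rw [pvIndexD dims m hmmem, ← hi1def]
    rw [PySem.List.slice_to_natCast dims i1]
    rw [show ((i1 : Int) + 1) = ((i1 + 1 : Nat) : Int) by push_cast; ring]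
    rw [PySem.List.slice_from_natCast dims (i1 + 1), ← hrest]
    rw [pvMaxD_eq_max? rest hrestne, ← hm2]
    rw [pvIndexD rest m2 hm2mem, ← hjdef]
    simp only [ge_iff_le, ← hi2def]
    by_cases hc : m2 = m
    · simp only [hc, beq_self_eq_true, if_true]
      simpa using pvB_assemble dims paths i1 i2 hn2 hi1lt hi2lt (Ne.symm hi2ne)
    · simp only [beq_eq_false_iff_ne.mpr hc, if_neg hc]
      simpa using pvB_assemble dims paths i2 i1 hn2 hi2lt hi1lt hi2ne
  -- A's two indices, by cases on whether the max is repeated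
  have hsdims : s ∈ dims := List.mem_of_mem_erase (hm ▸ hs_mem)
  have hmodlen : (dims.set (dims.idxOf s) (-1)).length = dims.length := List.length_set
  have hkey : (if m2 = m then i1 else i2) = dims.idxOf s ∧
      pvMaxD dims ∈ dims.set (dims.idxOf s) (-1) ∧
      (dims.set (dims.idxOf s) (-1)).idxOf m = (if m2 = m then i2 else i1) := by
    by_cases hc : m2 = m
    · -- repeated max: s = m, w1 = i1, w2 = second occurrence i2
      have hsm : s = m := by rw [hsm2, hc]
      have hmne1 : m ≠ -1 := by
        intro hmm
        apply hnd
        refine ⟨hn2, by rw [← hm, ← hmm], ?_⟩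
        have h1 : dims.erase (-1) = rest := by rw [← hmm]; exact hrest_erase.symm
        rw [h1, ← hm2, hc, ← hmm, ← hi1def]
      have ha1 : dims.idxOf s = i1 := by rw [hsm, hi1def]
      have hmodmem : m ∈ dims.set (dims.idxOf s) (-1) := by
        have : (dims.set (dims.idxOf s) (-1)).getD i2 0 = m := by
          rw [ha1, pvSetGetD dims i1 (-1) hi1lt i2 hi2lt, if_neg hi2ne, hi2v, hc]
        rw [← this]
        exact pvGetD_mem _ i2 (by rw [List.length_set]; exact hi2lt)
      have ha2 : (dims.set (dims.idxOf s) (-1)).idxOf m = i2 := by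
        rw [ha1]
        apply pvSetIdxOf dims i1 (-1) hi1lt m i2 (ha1 ▸ hmodmem) hi2lt
        · rw [pvSetGetD dims i1 (-1) hi1lt i2 hi2lt, if_neg hi2ne, hi2v, hc]
        · intro k hk
          by_cases hki : k = i1
          · rw [pvSetGetD dims i1 (-1) hi1lt k (by omega), if_pos hki]
            exact fun h => hmne1 h.symm
          · rw [pvSetGetD dims i1 (-1) hi1lt k (by omega), if_neg hki]
            exact hc ▸ hi2min k hk hki
      rw [if_pos hc, if_pos hc]
      exact ⟨ha1.symm ▸ ha1, hm ▸ hmodmem, ha2⟩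
    · -- unique max: w1 = i2 (index of the strictly smaller second value), w2 = i1
      have hlt : m2 < m := lt_of_le_of_ne hm2lem hc
      have hsm : s = m2 := hsm2
      have ha1 : dims.idxOf s = i2 := by
        rw [hsm]
        apply pvLeastNe_unique dims i1 m2
        · intro h
          apply hc
          rw [← hi1v, ← h]
          exact (pvIdxOf_getD dims m2 (by rw [← hsm]; exact hsdims)).symm
        · exact pvIdxOf_getD dims m2 (by rw [← hsm]; exact hsdims)
        · intro k hk _
          exact pvIdxOf_min dims m2 (by rw [← hsm]; exact hsdims) k hk
        · exact hi2ne
        · exact hi2v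
        · exact hi2min
      by_cases hm1 : m = -1
      · -- the masked sentinel equals the max; outside D_ the first -1 comes before w1
        have hi1i2 : i1 < i2 := by
          by_contra hcon
          apply hnd
          refine ⟨hn2, by rw [← hm, ← hm1], ?_⟩
          have h1 : dims.erase (-1) = rest := by rw [← hm1]; exact hrest_erase.symm
          rw [h1, ← hm2]
          have h2 : List.idxOf (-1) dims = i1 := by rw [← hm1, hi1def]
          have h3 : List.idxOf m2 dims = i2 := by rw [← hsm, ha1]
          omega
        have hmodmem : m ∈ dims.set (dims.idxOf s) (-1) := by
          have : (dims.set (dims.idxOf s) (-1)).getD i1 0 = m := by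
            rw [ha1, pvSetGetD dims i2 (-1) hi2lt i1 hi1lt, if_neg (by omega), hi1v]
          rw [← this]
          exact pvGetD_mem _ i1 (by rw [List.length_set]; exact hi1lt)
        have ha2 : (dims.set (dims.idxOf s) (-1)).idxOf m = i1 := by
          rw [ha1]
          apply pvSetIdxOf dims i2 (-1) hi2lt m i1 (ha1 ▸ hmodmem) hi1lt
          · rw [pvSetGetD dims i2 (-1) hi2lt i1 hi1lt, if_neg (by omega), hi1v]
          · intro k hk
            rw [pvSetGetD dims i2 (-1) hi2lt k (by omega), if_neg (by omega)]
            exact hi1min k hk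
        rw [if_neg hc, if_neg hc]
        exact ⟨ha1.symm, hm ▸ hmodmem, ha2⟩
      · have hmodmem : m ∈ dims.set (dims.idxOf s) (-1) := by
          have : (dims.set (dims.idxOf s) (-1)).getD i1 0 = m := by
            rw [ha1, pvSetGetD dims i2 (-1) hi2lt i1 hi1lt, if_neg (fun h => hi2ne h.symm), hi1v]
          rw [← this]
          exact pvGetD_mem _ i1 (by rw [List.length_set]; exact hi1lt)
        have ha2 : (dims.set (dims.idxOf s) (-1)).idxOf m = i1 := by
          rw [ha1]
          apply pvSetIdxOf dims i2 (-1) hi2lt m i1 (ha1 ▸ hmodmem) hi1lt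
          · rw [pvSetGetD dims i2 (-1) hi2lt i1 hi1lt, if_neg (fun h => hi2ne h.symm), hi1v]
          · intro k hk
            by_cases hki : k = i2
            · rw [pvSetGetD dims i2 (-1) hi2lt k (by omega), if_pos hki]
              exact fun h => hm1 h.symm
            · rw [pvSetGetD dims i2 (-1) hi2lt k (by omega), if_neg hki]
              exact hi1min k hk
        rw [if_neg hc, if_neg hc]
        exact ⟨ha1.symm, hm ▸ hmodmem, ha2⟩
  obtain ⟨hk1, hk2, hk3⟩ := hkey
  have h2a : dims.length - 2 < t.length := by omega
  have h1a : dims.length - 1 < t.length := by omega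
  have hdropA : t.drop (dims.length - 2) = [s, m] := by
    rw [List.drop_eq_getElem_cons h2a,
      show dims.length - 2 + 1 = dims.length - 1 by omega,
      List.drop_eq_getElem_cons h1a,
      show dims.length - 1 + 1 = dims.length by omega, List.drop_eq_nil_of_le (by omega)]
    congr 1
    · rw [hs, List.getD_eq_getElem _ _ h2a]
    · congr 1
      rw [← hlast, List.getD_eq_getElem _ _ h1a]
  have hAval : order_by_size_ORIG dims paths
      = pvBuild dims paths (if m2 = m then i1 else i2) (if m2 = m then i2 else i1) := by
    simp only [order_by_size_ORIG]
    rw [show ((dims.length : Int) - 2) = (((dims.length - 2 : Nat)) : Int) by omega]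
    rw [← ht, PySem.List.slice_from_natCast t (dims.length - 2), hdropA]
    rw [show PySem.List.pyGetD [s, m] 0 0 = s from rfl,
      show PySem.List.pyGetD [s, m] 1 0 = m from rfl]
    rw [pvIndexD dims s hsdims, ← hk1]
    simp only [PySem.List.pySetD_natCast]
    rw [hk1, pvIndexD _ m (hm ▸ hk2), hk3]
    have hb1lt : List.idxOf s dims < dims.length := by
      rw [← hk1]; split_ifs; exacts [hi1lt, hi2lt]
    have hb2lt : (if m2 = m then i2 else i1) < dims.length := by
      split_ifs; exacts [hi2lt, hi1lt]
    have hbne : List.idxOf s dims ≠ (if m2 = m then i2 else i1) := by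
      rw [← hk1]; split_ifs; exacts [Ne.symm hi2ne, hi2ne]
    rw [← hk1]
    exact pvA_assemble dims paths _ _ hn2 (hk1 ▸ hb1lt) hb2lt (hk1 ▸ hbne)
  exact hAval.trans hBval.symm


theorem pvTake2 {a : Type} (l : List a) (k : Nat) (h : l.length = k) :
    l.take 2 = l.take (min 2 k) := by
  by_cases h2 : 2 <= k
  · rw [min_eq_left h2]
  · rw [min_eq_right (by omega), ← h, List.take_length, List.take_of_length_le (by omega)]

theorem pvFilterLen1 (q : Nat) (n : Nat) :
    ((List.range n).filter (fun i => !(i == q))).length = n - (if q < n then 1 else 0) := by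
  induction n with
  | zero => simp
  | succ n ih =>
    rw [List.range_succ, List.filter_append, List.length_append, ih, List.filter_singleton,
      Bool.cond_eq_ite]
    split_ifs <;>
      simp only [List.length_cons, List.length_nil, Bool.not_eq_true',
        beq_eq_false_iff_ne, ne_eq] at * <;>
      omega


-- proof-side closed forms of the middle slots in the corner
def pvA0 (q : Nat) : Nat := if q = 0 then 1 else 0
def pvA1 (q : Nat) : Nat := if q ≤ 1 then 2 else 1
def pvB0 (q r : Nat) : Nat :=
  if q ≠ 0 ∧ r ≠ 0 then 0 else if q ≠ 1 ∧ r ≠ 1 then 1 else 2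
def pvB1 (q r : Nat) : Nat :=
  if pvB0 q r = 0 then (if q ≠ 1 ∧ r ≠ 1 then 1 else if q ≠ 2 ∧ r ≠ 2 then 2 else 3)
  else if pvB0 q r = 1 then (if q ≠ 2 ∧ r ≠ 2 then 2 else 3)
  else 3

-- with q < r the middle slots differ only when r ≤ 2, and only as stated
theorem pvVis (q r n : Nat) (pg : Nat → String) (hqr : q < r) (hr : r < n) :
    (([pvA0 q, pvA1 q].take (min 2 (n - 2))).map pg
      = ([pvB0 q r, pvB1 q r].take (min 2 (n - 2))).map pg)
    ↔ ((q = 0 ∧ r = 1 ∧ 3 ≤ n → pg 1 = pg 2) ∧ (r ≤ 2 ∧ 4 ≤ n → pg 2 = pg 3)) := by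
  by_cases hr3 : 3 ≤ r
  · have hr0 : r ≠ 0 := by omega
    have hr1 : r ≠ 1 := by omega
    have hr2 : r ≠ 2 := by omega
    have hB0 : pvB0 q r = pvA0 q := by
      simp only [pvB0, pvA0, hr0, hr1, ne_eq, not_false_iff, and_true]
      split_ifs <;> omega
    have hB1 : pvB1 q r = pvA1 q := by
      by_cases hq0 : q = 0
      · simp [pvB1, pvB0, pvA1, hq0, hr1, hr2]
      · by_cases hq1 : q = 1
        · simp [pvB1, pvB0, pvA1, hq1, hr0, hr2]
        · have hq2 : ¬ q ≤ 1 := by omega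
          simp [pvB1, pvB0, pvA1, hq0, hq1, hq2, hr0, hr1]
    rw [hB0, hB1]
    constructor
    · intro _
      exact ⟨fun h => absurd h.2.1 (by omega), fun h => absurd h.1 (by omega)⟩
    · intro _; rfl
  · rcases show n ≤ 2 ∨ n = 3 ∨ 4 ≤ n by omega with h | h | h
    · rw [show min 2 (n - 2) = 0 by omega]
      constructor
      · intro _
        exact ⟨fun hx => absurd hx.2.2 (by omega), fun hx => absurd hx.2 (by omega)⟩
      · intro _; rfl
    · subst h
      rw [show min 2 (3 - 2) = 1 by omega]
      interval_cases r <;> interval_cases q <;>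
        simp [pvA0, pvA1, pvB0, pvB1]
    · rw [show min 2 (n - 2) = 2 by omega]
      interval_cases r <;> interval_cases q <;>
        simp [pvA0, pvA1, pvB0, pvB1, show (3:Nat) ≤ n by omega, show (4:Nat) ≤ n by omega]

theorem pvTakeTwoRange (p : Nat → Bool) (n : Nat) (hn : 4 ≤ n)
    (hlen : 2 ≤ ((List.range 4).filter p).length) :
    ((List.range n).filter p).take 2 = ((List.range 4).filter p).take 2 := by
  rw [show List.range n = List.range 4 ++ (List.range (n - 4)).map (4 + ·) by
      rw [← List.range_add]; congr 1; omega,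
    List.filter_append, List.take_append,
    show 2 - ((List.range 4).filter p).length = 0 by omega]
  simp

theorem pvA0_clamp (q : Nat) : pvA0 q = pvA0 (min q 4) := by
  unfold pvA0; split_ifs <;> omega

theorem pvA1_clamp (q : Nat) : pvA1 q = pvA1 (min q 4) := by
  unfold pvA1; split_ifs <;> omega

theorem pvB0_clamp (q r : Nat) : pvB0 q r = pvB0 (min q 4) (min r 4) := by
  unfold pvB0; split_ifs <;> omega

theorem pvB1_clamp (q r : Nat) : pvB1 q r = pvB1 (min q 4) (min r 4) := by
  unfold pvB1 pvB0; split_ifs <;> omega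

theorem pvBeqClamp (q i : Nat) (hi : i < 4) : (i == q) = (i == min q 4) := by
  by_cases h : i = q
  · subst h; simp; omega
  · have h2 : i ≠ min q 4 := by omega
    simp [h, h2]

-- the first min 2 (n-2) indices of range n avoiding q, in closed form
theorem pvFirstTwo1 (q n : Nat) (hq : q < n) :
    ((List.range n).filter (fun i => !(i == q))).take (min 2 (n - 2))
      = [pvA0 q, pvA1 q].take (min 2 (n - 2)) := by
  have hcong : ∀ m, m ≤ 4 → (List.range m).filter (fun i => !(i == q))
      = (List.range m).filter (fun i => !(i == min q 4)) := by
    intro m hm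
    refine List.filter_congr ?_
    intro i hi
    rw [pvBeqClamp q i (by simp at hi; omega)]
  rcases show n ≤ 2 ∨ n = 3 ∨ 4 ≤ n by omega with h | h | h
  · rw [show min 2 (n - 2) = 0 by omega]
    simp
  · subst h
    rw [show min 2 (3 - 2) = 1 by omega, hcong 3 (by omega),
      pvA0_clamp, pvA1_clamp, show min q 4 = q by omega]
    interval_cases q <;> decide
  · rw [show min 2 (n - 2) = 2 by omega,
      pvTakeTwoRange _ n h (by rw [pvFilterLen1]; split_ifs <;> omega),
      hcong 4 (by omega), pvA0_clamp, pvA1_clamp]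
    have hq4 : min q 4 ≤ 4 := by omega
    set q' := min q 4 with hq'
    interval_cases q' <;> decide

-- the first min 2 (n-2) indices of range n avoiding q and r, in closed form
theorem pvFirstTwo2 (q r n : Nat) (hq : q < n) (hr : r < n) (hne : q ≠ r) :
    ((List.range n).filter (fun i => !(i == q) && !(i == r))).take (min 2 (n - 2))
      = [pvB0 q r, pvB1 q r].take (min 2 (n - 2)) := by
  have hcong : ∀ m, m ≤ 4 → (List.range m).filter (fun i => !(i == q) && !(i == r))
      = (List.range m).filter (fun i => !(i == min q 4) && !(i == min r 4)) := by
    intro m hm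
    refine List.filter_congr ?_
    intro i hi
    rw [pvBeqClamp q i (by simp at hi; omega), pvBeqClamp r i (by simp at hi; omega)]
  rcases show n ≤ 2 ∨ n = 3 ∨ 4 ≤ n by omega with h | h | h
  · rw [show min 2 (n - 2) = 0 by omega]
    simp
  · subst h
    rw [show min 2 (3 - 2) = 1 by omega, hcong 3 (by omega),
      pvB0_clamp, pvB1_clamp, show min q 4 = q by omega, show min r 4 = r by omega]
    interval_cases q <;> interval_cases r <;> first | omega | decide
  · rw [show min 2 (n - 2) = 2 by omega,
      pvTakeTwoRange _ n h (by rw [pvFilterLen _ _ hne]; split_ifs <;> omega),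
      hcong 4 (by omega), pvB0_clamp, pvB1_clamp]
    have hq4 : min q 4 ≤ 4 := by omega
    have hr4 : min r 4 ≤ 4 := by omega
    have hqr : min q 4 = min r 4 → min q 4 = 4 := by omega
    set q' := min q 4 with hq'
    set r' := min r 4 with hr'
    interval_cases q' <;> interval_cases r' <;> first | (exfalso; omega) | decide

-- A's assembly when the two "largest" indices coincide (the sentinel corner)
theorem pvA_assemble_eq (dims : List Int) (paths : List String) (q : Nat)
    (hn2 : 2 <= dims.length) (hq : q < dims.length) :
    (if 3 <= (dims.length : Int) then
      if 4 <= (dims.length : Int) then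
        PySem.List.insert
          (PySem.List.insert
            [PySem.List.pyGetD paths (q : Int) "", PySem.List.pyGetD paths (q : Int) ""] 1
            (PySem.List.pyGetD paths
              (PySem.List.pyGetD
                (List.filter (fun n => !([(q : Int), (q : Int)].contains n))
                  (PySem.List.pyRange 0 (dims.length : Int) 1)) 0 0) "")) 2
          (PySem.List.pyGetD paths
            (PySem.List.pyGetD
              (List.filter (fun n => !([(q : Int), (q : Int)].contains n))
                (PySem.List.pyRange 0 (dims.length : Int) 1)) 1 0) "")
      else
        PySem.List.insert
          [PySem.List.pyGetD paths (q : Int) "", PySem.List.pyGetD paths (q : Int) ""] 1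
          (PySem.List.pyGetD paths
            (PySem.List.pyGetD
              (List.filter (fun n => !([(q : Int), (q : Int)].contains n))
                (PySem.List.pyRange 0 (dims.length : Int) 1)) 0 0) "")
    else
      [PySem.List.pyGetD paths (q : Int) "", PySem.List.pyGetD paths (q : Int) ""])
    = [paths.getD q ""]
        ++ (((List.range dims.length).filter (fun i => !(i == q))).take
              (min 2 (dims.length - 2))).map (fun i => paths.getD i "")
        ++ [paths.getD q ""] := by
  have hFeq : List.filter (fun n => !([(q : Int), (q : Int)].contains n))
      (PySem.List.pyRange 0 (dims.length : Int) 1)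
      = List.map (fun k : Nat => (k : Int))
          ((List.range dims.length).filter (fun i => !(i == q))) := by
    rw [PySem.List.pyRange_zero_natCast, List.filter_map]
    refine congrArg _ (List.filter_congr ?_)
    intro i _
    by_cases e : i = q <;> simp [e]
  rw [hFeq]
  set S := (List.range dims.length).filter (fun i => !(i == q)) with hS
  have hSlen : S.length = dims.length - 1 := by
    rw [hS, pvFilterLen1 q, if_pos hq]
  by_cases hc3 : 3 <= dims.length
  · rw [if_pos (by exact_mod_cast hc3)]
    by_cases hc4 : 4 <= dims.length
    · rw [if_pos (by exact_mod_cast hc4)]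
      rcases S with _ | ⟨s0, _ | ⟨s1, tl⟩⟩ <;>
        simp only [List.length_nil, List.length_cons] at hSlen
      · omega
      · omega
      · have hmin : min 2 (dims.length - 2) = 2 := by omega
        rw [hmin]
        simp only [List.map_cons, PySem.List.pyGetD_zero_cons]
        rw [PySem.List.pyGetD_ofNat' ((s0 : Int) :: (s1 : Int) :: List.map (fun k : Nat => (k : Int)) tl) 1 0]
        rw [PySem.List.insert_ofNat _ 1 _ (by simp), PySem.List.insert_ofNat _ 2 _ (by simp)]
        simp [PySem.List.pyGetD_natCast, List.take]
    · rw [if_neg (by exact_mod_cast hc4)]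
      rcases S with _ | ⟨s0, _ | ⟨s1, tl⟩⟩ <;>
        simp only [List.length_nil, List.length_cons] at hSlen
      · omega
      · omega
      · have htl : tl = [] := List.eq_nil_of_length_eq_zero (by omega)
        subst htl
        have hmin : min 2 (dims.length - 2) = 1 := by omega
        rw [hmin]
        simp only [List.map_cons, List.map_nil, PySem.List.pyGetD_zero_cons]
        rw [PySem.List.insert_ofNat _ 1 _ (by simp)]
        simp [PySem.List.pyGetD_natCast, List.take]
  · rw [if_neg (by exact_mod_cast hc3)]
    have hmin : min 2 (dims.length - 2) = 0 := by omega
    rw [hmin]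
    simp [PySem.List.pyGetD_natCast]

-- inside the sentinel corner both outputs have a closed form: A repeats paths[q] at both ends,
-- B ends with paths[r]
theorem pvCornerForms (dims : List Int) (paths : List String)
    (hpre : Pre_order_by_size_ORIG dims paths) (hc3 : pvCorner3 dims) :
    order_by_size_ORIG dims paths
      = [paths.getD (pvCornerQ dims) ""]
          ++ ([pvA0 (pvCornerQ dims), pvA1 (pvCornerQ dims)].take
                (min 2 (dims.length - 2))).map (fun i => paths.getD i "")
          ++ [paths.getD (pvCornerQ dims) ""]
    ∧ order_by_size_ORIG_alt dims paths
      = [paths.getD (pvCornerQ dims) ""]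
          ++ ([pvB0 (pvCornerQ dims) (pvCornerR dims),
               pvB1 (pvCornerQ dims) (pvCornerR dims)].take
                (min 2 (dims.length - 2))).map (fun i => paths.getD i "")
          ++ [paths.getD (pvCornerR dims) ""]
    ∧ pvCornerQ dims < pvCornerR dims ∧ pvCornerR dims < dims.length := by
  obtain ⟨hn2, hnp⟩ := hpre
  have hne : dims ≠ [] := by intro h; rw [h] at hn2; simp at hn2
  have hmmem : pvMaxD dims ∈ dims := pvMaxD_mem dims hne
  have hmle : ∀ y ∈ dims, y <= pvMaxD dims := pvMaxD_le dims hne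
  set m := pvMaxD dims with hm
  set i1 := dims.idxOf m with hi1def
  have hi1lt : i1 < dims.length := List.idxOf_lt_length_of_mem hmmem
  have hi1v : dims.getD i1 0 = m := by
    rw [List.getD_eq_getElem _ _ hi1lt]; exact List.getElem_idxOf _
  have hi1min : ∀ j, j < i1 → dims.getD j 0 ≠ m := pvIdxOf_min dims m hmmem
  set rest := dims.take i1 ++ dims.drop (i1 + 1) with hrest
  have hrest_erase : rest = dims.erase m := by
    rw [List.erase_eq_eraseIdx, pvIdxOf?_eq_some dims m hmmem]
    show rest = dims.eraseIdx (List.idxOf m dims)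
    rw [List.eraseIdx_eq_take_drop_succ]
  have hrestlen : rest.length = dims.length - 1 := by
    rw [hrest, ← List.eraseIdx_eq_take_drop_succ, List.length_eraseIdx, if_pos hi1lt]
  have hrestne : rest ≠ [] := by
    intro h
    rw [h] at hrestlen
    simp at hrestlen
    omega
  have hm2mem : pvMaxD rest ∈ rest := pvMaxD_mem rest hrestne
  set m2 := pvMaxD rest with hm2
  set t := PySem.List.sorted dims (fun x => x) false with ht
  have htlen : t.length = dims.length := (PySem.List.sorted_perm dims (fun x => x) false).length_eq
  have hlast : t.getD (dims.length - 1) 0 = m := pvSorted_last dims hne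
  obtain ⟨hs_mem, hs_le⟩ := pvSorted_second dims hn2
  set s := t.getD (dims.length - 2) 0 with hs
  have hsm2 : s = m2 := by
    apply le_antisymm
    · exact pvMaxD_le rest hrestne s (hrest_erase ▸ hs_mem)
    · exact hs_le m2 (hrest_erase ▸ hm2mem)
  set j := rest.idxOf m2 with hjdef
  set i2 := if i1 <= j then j + 1 else j with hi2def
  obtain ⟨hi2lt, hi2ne, hi2v, hi2min⟩ :=
    pvRest_char dims i1 m2 hi1lt (hrest ▸ hm2mem) j i2 (hrest ▸ hjdef) hi2def
  have hBval : order_by_size_ORIG_alt dims paths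
      = pvBuild dims paths (if m2 = m then i1 else i2) (if m2 = m then i2 else i1) := by
    simp only [order_by_size_ORIG_alt]
    rw [pvMaxD_eq_max? dims hne, ← hm]
    rw [pvIndexD dims m hmmem, ← hi1def]
    rw [PySem.List.slice_to_natCast dims i1]
    rw [show ((i1 : Int) + 1) = ((i1 + 1 : Nat) : Int) by push_cast; ring]
    rw [PySem.List.slice_from_natCast dims (i1 + 1), ← hrest]
    rw [pvMaxD_eq_max? rest hrestne, ← hm2]
    rw [pvIndexD rest m2 hm2mem, ← hjdef]
    simp only [ge_iff_le, ← hi2def]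
    by_cases hc : m2 = m
    · simp only [hc, beq_self_eq_true, if_true]
      simpa using pvB_assemble dims paths i1 i2 hn2 hi1lt hi2lt (Ne.symm hi2ne)
    · simp only [beq_eq_false_iff_ne.mpr hc, if_neg hc]
      simpa using pvB_assemble dims paths i2 i1 hn2 hi2lt hi1lt hi2ne
  -- corner facts
  obtain ⟨-, hdmax, hdle⟩ := hc3
  have hm1 : m = -1 := by rw [hm, hdmax]
  have herase1 : dims.erase (-1) = rest := by rw [← hm1]; exact hrest_erase.symm
  have hsdims : s ∈ dims := List.mem_of_mem_erase (hm ▸ hs_mem)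
  have hqQ : pvCornerQ dims = dims.idxOf s := by
    rw [pvCornerQ_eq, herase1, ← hm2, hsm2]
  have hi1' : List.idxOf (-1 : Int) dims = i1 := by rw [← hm1]
  have hdle' : dims.idxOf s <= i1 := by
    have hh : pvCornerQ dims ≤ List.idxOf (-1 : Int) dims := by
      rw [pvCornerQ_eq]; exact hdle
    rw [hqQ, hi1'] at hh
    exact hh
  have hslt : dims.idxOf s < dims.length := List.idxOf_lt_length_of_mem hsdims
  -- A's first index, and the masked second index collapsing onto it (old tight argument)
  have ha1 : dims.idxOf s = (if m2 = m then i1 else i2) := by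
    by_cases hc : m2 = m
    · rw [if_pos hc, hsm2, hc, hi1def]
    · rw [if_neg hc, hsm2]
      apply pvLeastNe_unique dims i1 m2
      · intro h
        apply hc
        rw [← hi1v, ← h]
        exact (pvIdxOf_getD dims m2 (by rw [← hsm2]; exact hsdims)).symm
      · exact pvIdxOf_getD dims m2 (by rw [← hsm2]; exact hsdims)
      · intro k hk _
        exact pvIdxOf_min dims m2 (by rw [← hsm2]; exact hsdims) k hk
      · exact hi2ne
      · exact hi2v
      · exact hi2min
  have hw2A : (dims.set (dims.idxOf s) (-1)).idxOf m = dims.idxOf s := by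
    by_cases hc : m2 = m
    · have ha1' : dims.idxOf s = i1 := by rw [ha1, if_pos hc]
      rw [ha1']
      apply pvSetIdxOf dims i1 (-1) hi1lt m i1 ?_ hi1lt ?_ ?_
      · have hv : (dims.set i1 (-1)).getD i1 0 = m := by
          rw [pvSetGetD dims i1 (-1) hi1lt i1 hi1lt, if_pos rfl, hm1]
        rw [← hv]
        exact pvGetD_mem _ i1 (by rw [List.length_set]; exact hi1lt)
      · rw [pvSetGetD dims i1 (-1) hi1lt i1 hi1lt, if_pos rfl, hm1]
      · intro k hk
        rw [pvSetGetD dims i1 (-1) hi1lt k (by omega), if_neg (by omega)]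
        exact hi1min k hk
    · have ha1' : dims.idxOf s = i2 := by rw [ha1, if_neg hc]
      have hi2i1 : i2 < i1 := by
        have h' := hdle'
        rw [ha1'] at h'
        omega
      rw [ha1']
      apply pvSetIdxOf dims i2 (-1) hi2lt m i2 ?_ hi2lt ?_ ?_
      · have hv : (dims.set i2 (-1)).getD i2 0 = m := by
          rw [pvSetGetD dims i2 (-1) hi2lt i2 hi2lt, if_pos rfl, hm1]
        rw [← hv]
        exact pvGetD_mem _ i2 (by rw [List.length_set]; exact hi2lt)
      · rw [pvSetGetD dims i2 (-1) hi2lt i2 hi2lt, if_pos rfl, hm1]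
      · intro k hk
        rw [pvSetGetD dims i2 (-1) hi2lt k (by omega), if_neg (by omega)]
        exact hi1min k (by omega)
  have hmodmem : m ∈ dims.set (dims.idxOf s) (-1) := by
    have hv : (dims.set (dims.idxOf s) (-1)).getD (dims.idxOf s) 0 = m := by
      rw [pvSetGetD dims _ (-1) hslt _ hslt, if_pos rfl, hm1]
    rw [← hv]
    exact pvGetD_mem _ _ (by rw [List.length_set]; exact hslt)
  -- identify B's end index with pvCornerR
  have hrR : pvCornerR dims = (if m2 = m then i2 else i1) := by
    unfold pvCornerR
    rw [herase1, ← hm2]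
    by_cases hc : m2 = m
    · rw [if_pos (by rw [hc, hm1]), if_pos hc, hqQ,
        show List.idxOf s dims = i1 by rw [hsm2, hc]]
      have hnotmem : (-1 : Int) ∉ dims.take i1 := by
        intro hmem
        obtain ⟨k, hk, hkv⟩ := List.getElem_of_mem hmem
        have hklt : k < i1 := by
          have := hk
          simp only [List.length_take] at this
          omega
        have hgd : dims.getD k 0 = m := by
          rw [List.getD_eq_getElem _ _ (by omega : k < dims.length), hm1, ← hkv]
          exact (List.getElem_take).symm
        exact hi1min k hklt hgd
      have hj' : j = i1 + List.idxOf (-1 : Int) (dims.drop (i1 + 1)) := by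
        rw [hjdef, show m2 = (-1 : Int) by rw [hc, hm1], hrest,
          List.idxOf_append_of_notMem hnotmem, List.length_take,
          Nat.min_eq_left (by omega)]
      have hi2' : i2 = j + 1 := by
        rw [hi2def, if_pos (by omega)]
      omega
    · rw [if_neg (fun h => hc (h.trans hm1.symm)), if_neg hc]
      exact hi1'
  -- the sorted list's last two entries
  have h2a : dims.length - 2 < t.length := by omega
  have h1a : dims.length - 1 < t.length := by omega
  have hdropA : t.drop (dims.length - 2) = [s, m] := by
    rw [List.drop_eq_getElem_cons h2a,
      show dims.length - 2 + 1 = dims.length - 1 by omega,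
      List.drop_eq_getElem_cons h1a,
      show dims.length - 1 + 1 = dims.length by omega, List.drop_eq_nil_of_le (by omega)]
    congr 1
    · rw [hs, List.getD_eq_getElem _ _ h2a]
    · congr 1
      rw [← hlast, List.getD_eq_getElem _ _ h1a]
  have hqltr : dims.idxOf s < (if m2 = m then i2 else i1) := by
    by_cases hc : m2 = m
    · rw [if_pos hc]
      have ha1' : dims.idxOf s = i1 := by rw [ha1, if_pos hc]
      rw [ha1']
      rcases Nat.lt_or_ge i1 i2 with h | h
      · exact h
      · exfalso
        have hlt : i2 < i1 := by omega
        exact hi1min i2 hlt (by rw [hi2v, hc])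
    · rw [if_neg hc]
      have ha1' : dims.idxOf s = i2 := by rw [ha1, if_neg hc]
      rw [ha1']
      have h' := hdle'
      rw [ha1'] at h'
      omega
  have hbounds : pvCornerQ dims < pvCornerR dims ∧ pvCornerR dims < dims.length := by
    constructor
    · rw [hqQ, hrR]
      exact hqltr
    · rw [hrR]
      split_ifs
      · exact hi2lt
      · exact hi1lt
  refine ⟨?_, ?_, hbounds⟩
  · -- A's corner form
    simp only [hqQ]
    simp only [order_by_size_ORIG]
    rw [show ((dims.length : Int) - 2) = (((dims.length - 2 : Nat)) : Int) by omega]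
    rw [← ht, PySem.List.slice_from_natCast t (dims.length - 2), hdropA]
    rw [show PySem.List.pyGetD [s, m] 0 0 = s from rfl,
      show PySem.List.pyGetD [s, m] 1 0 = m from rfl]
    rw [pvIndexD dims s hsdims]
    simp only [PySem.List.pySetD_natCast]
    rw [pvIndexD _ m hmodmem, hw2A,
      pvA_assemble_eq dims paths (dims.idxOf s) hn2 hslt,
      pvFirstTwo1 (dims.idxOf s) dims.length hslt]
  · -- B's corner form
    rw [hBval, show (if m2 = m then i1 else i2) = pvCornerQ dims from (hqQ.trans ha1).symm,
      ← hrR]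
    have hqr : pvCornerQ dims < dims.length ∧ pvCornerR dims < dims.length ∧
        pvCornerQ dims ≠ pvCornerR dims := by
      rw [hqQ, ha1, hrR]
      by_cases hc : m2 = m
      · rw [if_pos hc, if_pos hc]
        exact ⟨hi1lt, hi2lt, Ne.symm hi2ne⟩
      · rw [if_neg hc, if_neg hc]
        exact ⟨hi2lt, hi1lt, hi2ne⟩
    simp only [pvBuild]
    rw [pvTake2 _ (dims.length - 2)
      (by rw [pvFilterLen _ _ hqr.2.2, if_pos hqr.1, if_pos hqr.2.1]),
      pvFirstTwo2 (pvCornerQ dims) (pvCornerR dims) dims.length hqr.1 hqr.2.1 hqr.2.2]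

-- ===== VERDICT (by name: the statement is the Claim_ definition above) =====

theorem order_by_size_ORIG_spec : Claim_unchanged_order_by_size_ORIG := by
  intro dims paths _ hpre hnd
  by_cases hc3 : pvCorner3 dims
  · have hpq : paths.getD (pvCornerQ dims) "" = paths.getD (pvCornerR dims) "" ∧
        (pvCornerR dims = 1 ∧ 3 ≤ dims.length → paths.getD 1 "" = paths.getD 2 "") ∧
        (pvCornerR dims ≤ 2 ∧ 4 ≤ dims.length → paths.getD 2 "" = paths.getD 3 "") := by
      by_contra h
      apply hnd
      obtain ⟨hn2', hmax, hidx⟩ := hc3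
      exact (pvD_iff dims paths hmax).mpr ⟨by rw [pvCornerQ_eq]; exact hidx, h⟩
    obtain ⟨hA, hB, hlt, hrlt⟩ := pvCornerForms dims paths hpre hc3
    rw [hA, hB, hpq.1,
      (pvVis (pvCornerQ dims) (pvCornerR dims) dims.length
        (fun i => paths.getD i "") hlt hrlt).mpr
        ⟨fun hx => hpq.2.1 ⟨hx.2.1, hx.2.2⟩, hpq.2.2⟩]
  · exact pvMain dims paths hpre hc3

theorem order_by_size_ORIG_changed : Claim_changed_order_by_size_ORIG := by
  unfold Claim_changed_order_by_size_ORIG; decide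

theorem order_by_size_ORIG_tight : Claim_exact_order_by_size_ORIG := by
  intro dims paths _ hpre hd heq
  have hdmax : pvMaxD dims = -1 := hd.1
  obtain ⟨hdle, hvis⟩ := (pvD_iff dims paths hdmax).mp hd
  have hc3 : pvCorner3 dims :=
    ⟨hpre.1, hdmax, by rw [← pvCornerQ_eq]; exact hdle⟩
  obtain ⟨hA, hB, hlt, hrlt⟩ := pvCornerForms dims paths hpre hc3
  rw [hA, hB] at heq
  simp only [List.cons_append, List.nil_append] at heq
  have h2 : ([pvA0 (pvCornerQ dims), pvA1 (pvCornerQ dims)].take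
        (min 2 (dims.length - 2))).map (fun i => paths.getD i "")
        ++ [paths.getD (pvCornerQ dims) ""]
      = ([pvB0 (pvCornerQ dims) (pvCornerR dims),
          pvB1 (pvCornerQ dims) (pvCornerR dims)].take
        (min 2 (dims.length - 2))).map (fun i => paths.getD i "")
        ++ [paths.getD (pvCornerR dims) ""] := by
    injection heq
  obtain ⟨hxy, hbc⟩ := List.append_inj' h2 rfl
  have hb : paths.getD (pvCornerQ dims) "" = paths.getD (pvCornerR dims) "" := by
    injection hbc
  have hv := (pvVis (pvCornerQ dims) (pvCornerR dims) dims.length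
    (fun i => paths.getD i "") hlt hrlt).mp hxy
  refine hvis ⟨hb, ?_, hv.2⟩
  intro hy
  exact hv.1 ⟨by omega, hy.1, hy.2⟩
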